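-- pv_equiv track=rewrite | github.com/irupawala/Ibrahim-List | Ibrahim Personal/Ready/ADMSU/Miscallaneous Problems Practice/MaxPrizesGreedy.py | maxPrizes
-- ===== SOURCE A (Python) =====
-- def maxPrizes(n):
--     prizeList = []
--     prize = 1
--     while n > 0:
--         n -= prize
--         if prize < n:
--             prizeList.append(prize)
--         else:
--             prizeList.append(n+prize)
--             n = 0
--         prize += 1
--
--     return prizeList
-- ===== SOURCE B (Python) =====
-- def maxPrizes(n):
--     # Find k = largest integer with k*(k+1)//2 <= n by binary search,
--     # then the answer is [1, 2, ..., k-1, n - (k-1)*k//2].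
--     if n <= 0:
--         return []
--     lo, hi = 1, 2
--     while hi * (hi + 1) // 2 <= n:
--         hi *= 2
--     while hi - lo > 1:
--         mid = (lo + hi) // 2
--         if mid * (mid + 1) // 2 <= n:
--             lo = mid
--         else:
--             hi = mid
--     return list(range(1, lo)) + [n - (lo - 1) * lo // 2]
-- ===== Notes on version B (the rewrite author's own statement) =====
-- stated objective: alternative
-- what changed: Replaces the one-prize-at-a-time subtraction loop by a binary search for the largest prize count whose triangular number fits in n, then emits the range of small prizes plus the remainder in one step.
import Mathlib
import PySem

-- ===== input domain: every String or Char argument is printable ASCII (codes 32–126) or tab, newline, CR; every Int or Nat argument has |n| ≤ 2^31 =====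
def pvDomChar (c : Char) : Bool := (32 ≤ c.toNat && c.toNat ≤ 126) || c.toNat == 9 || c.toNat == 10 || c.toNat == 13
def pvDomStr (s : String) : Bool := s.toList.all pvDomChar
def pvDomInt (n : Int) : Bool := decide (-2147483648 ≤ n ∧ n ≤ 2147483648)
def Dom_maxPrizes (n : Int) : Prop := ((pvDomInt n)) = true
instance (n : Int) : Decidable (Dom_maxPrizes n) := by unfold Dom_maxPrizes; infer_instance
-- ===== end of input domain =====

-- B replaces A's one-prize-at-a-time subtraction loop by a binary search for the
-- prize count, then emits the range of small prizes plus the remainder in one step.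

-- ===== PORT A =====
-- while n > 0: n -= prize; if prize < n: append prize else: append n+prize; n = 0; prize += 1
-- (hp : 1 ≤ prize) only justifies termination; it is always true in A (prize starts at 1 and grows).
def maxPrizesLoop (n prize : Int) (hp : 1 ≤ prize) (acc : List Int) : List Int :=
  if h : 0 < n then
    if prize < n - prize then
      maxPrizesLoop (n - prize) (prize + 1) (by omega) (acc ++ [prize])
    else
      acc ++ [(n - prize) + prize]
  else acc
termination_by n.toNat
decreasing_by omega

def maxPrizes (n : Int) : List Int := maxPrizesLoop n 1 (by norm_num) []

-- ===== PORT B =====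
-- while hi*(hi+1)//2 <= n: hi *= 2
def altGrow (n hi : Int) (hh : 1 ≤ hi) : Int :=
  if h : PySem.Int.floordiv (hi * (hi + 1)) 2 ≤ n then
    altGrow n (2 * hi) (by omega)
  else hi
termination_by (2 * n + 1 - hi).toNat
decreasing_by
  rw [PySem.Int.floordiv_eq_ediv_of_pos (by norm_num)] at h
  have h2 : 2 * hi ≤ hi * (hi + 1) := by nlinarith
  omega

-- while hi - lo > 1: mid = (lo+hi)//2; if mid*(mid+1)//2 <= n: lo = mid else: hi = mid
def altBin (n lo hi : Int) : Int :=
  if h : 1 < hi - lo then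
    if PySem.Int.floordiv
        (PySem.Int.floordiv (lo + hi) 2 * (PySem.Int.floordiv (lo + hi) 2 + 1)) 2 ≤ n then
      altBin n (PySem.Int.floordiv (lo + hi) 2) hi
    else
      altBin n lo (PySem.Int.floordiv (lo + hi) 2)
  else lo
termination_by (hi - lo).toNat
decreasing_by
  all_goals
    rw [PySem.Int.floordiv_eq_ediv_of_pos (by norm_num)]
    omega

def maxPrizes_alt (n : Int) : List Int :=
  if n ≤ 0 then []
  else
    let hi := altGrow n 2 (by norm_num)
    let k := altBin n 1 hi
    PySem.List.pyRange 1 k 1 ++ [n - PySem.Int.floordiv ((k - 1) * k) 2]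

-- ===== PRECONDITION & SPEC =====
def Spec_maxPrizes (n : Int) (out : List Int) : Prop := out = maxPrizes_alt n
instance (n : Int) (out : List Int) : Decidable (Spec_maxPrizes n out) := by unfold Spec_maxPrizes; infer_instance

-- ===== CLAIM (what is proved, stated in full; the proofs are below) =====
def Claim_equal_maxPrizes : Prop := ∀ (n : Int), Dom_maxPrizes n → Spec_maxPrizes n (maxPrizes n)

-- ===== LEMMAS AND PROOFS =====

-- triangular number k*(k+1)/2 (Euclidean division; the product is even so all conventions agree)
def tri (j : Int) : Int := j * (j + 1) / 2

lemma tri_two (j : Int) : 2 * tri j = j * (j + 1) := by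
  rcases Int.even_mul_succ_self j with ⟨r, hr⟩
  unfold tri
  rw [hr, show r + r = 2 * r by ring, Int.mul_ediv_cancel_left r (by norm_num)]

lemma tri_succ (j : Int) : tri (j + 1) = tri j + (j + 1) := by
  have h1 := tri_two j
  have h2 := tri_two (j + 1)
  nlinarith

lemma tri_mono {a b : Int} (ha : 0 ≤ a) (hab : a ≤ b) : tri a ≤ tri b := by
  have h1 := tri_two a
  have h2 := tri_two b
  nlinarith

lemma tri_floordiv (x : Int) : PySem.Int.floordiv (x * (x + 1)) 2 = tri x := by
  rw [PySem.Int.floordiv_eq_ediv_of_pos (by norm_num)]; rfl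

-- uniqueness of the bracketing k
lemma kp_uniq {n a b : Int} (ha1 : 1 ≤ a) (hb1 : 1 ≤ b)
    (ha2 : tri a ≤ n) (ha3 : n < tri (a + 1))
    (hb2 : tri b ≤ n) (hb3 : n < tri (b + 1)) : a = b := by
  rcases lt_trichotomy a b with h | h | h
  · exfalso
    have := tri_mono (by omega : (0:Int) ≤ a + 1) (by omega : a + 1 ≤ b)
    omega
  · exact h
  · exfalso
    have := tri_mono (by omega : (0:Int) ≤ b + 1) (by omega : b + 1 ≤ a)
    omega

-- A's loop, characterised: with N := n + tri (prize-1) the total, the loop emits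
-- prize, prize+1, …, k-1 and then the remainder N - tri (k-1).
lemma loopA_spec (k : Int) (hk1 : 1 ≤ k) :
    ∀ (m : Nat) (n prize : Int) (hp : 1 ≤ prize) (acc : List Int),
      n.toNat ≤ m → prize ≤ n →
      tri k ≤ n + tri (prize - 1) → n + tri (prize - 1) < tri (k + 1) →
      maxPrizesLoop n prize hp acc =
        acc ++ PySem.List.pyRange prize k 1 ++ [n + tri (prize - 1) - tri (k - 1)] := by
  intro m
  induction m with
  | zero =>
    intro n prize hp acc hm hn _ _
    omega
  | succ m ih =>
    intro n prize hp acc hm hn h2 h3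
    have hn0 : 0 < n := by omega
    rw [maxPrizesLoop, dif_pos hn0]
    have hts : tri prize = tri (prize - 1) + prize := by
      have := tri_succ (prize - 1); simpa using this
    by_cases hs : prize < n - prize
    · rw [if_pos hs]
      have hts2 : tri (prize + 1) = tri (prize - 1) + 2 * prize + 1 := by
        have := tri_succ prize; omega
      have hk : prize < k := by
        by_contra hc
        have := tri_mono (by omega : (0:Int) ≤ k + 1) (by omega : k + 1 ≤ prize + 1)
        omega
      have hNeq : (n - prize) + tri (prize + 1 - 1) = n + tri (prize - 1) := by
        have : prize + 1 - 1 = prize := by ring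
        rw [this]; omega
      rw [ih (n - prize) (prize + 1) (by omega) (acc ++ [prize]) (by omega) (by omega)
          (by omega) (by omega)]
      rw [PySem.List.pyRange_one_cons hk, hNeq]
      simp
    · rw [if_neg hs]
      have hkp : k = prize := by
        refine kp_uniq hk1 hp h2 h3 ?_ ?_
        · omega
        · have hts2 : tri (prize + 1) = tri (prize - 1) + 2 * prize + 1 := by
            have := tri_succ prize; omega
          omega
      subst hkp
      rw [PySem.List.pyRange_one_eq_nil (le_refl k)]
      have : n - k + k = n + tri (k - 1) - tri (k - 1) := by omega
      simp [this]

-- B's first loop returns hi' ≥ hi with n < tri hi'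
lemma altGrow_spec : ∀ (m : Nat) (n hi : Int) (hh : 1 ≤ hi), (2 * n + 1 - hi).toNat ≤ m →
    hi ≤ altGrow n hi hh ∧ n < tri (altGrow n hi hh) := by
  intro m
  induction m with
  | zero =>
    intro n hi hh hm
    rw [altGrow.eq_def]
    by_cases h : PySem.Int.floordiv (hi * (hi + 1)) 2 ≤ n
    · exfalso
      rw [tri_floordiv] at h
      have hb : 2 * n + 1 ≤ hi := by omega
      have := tri_two hi
      nlinarith
    · rw [dif_neg h]
      rw [tri_floordiv] at h
      omega
  | succ m ih =>
    intro n hi hh hm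
    rw [altGrow.eq_def]
    by_cases h : PySem.Int.floordiv (hi * (hi + 1)) 2 ≤ n
    · rw [dif_pos h]
      rw [tri_floordiv] at h
      have hhi : hi ≤ n := by
        have := tri_two hi
        nlinarith
      have := ih n (2 * hi) (by omega) (by omega)
      omega
    · rw [dif_neg h]
      rw [tri_floordiv] at h
      omega

-- B's binary search keeps tri lo ≤ n < tri hi and returns the bracketing k
lemma altBin_spec : ∀ (m : Nat) (n lo hi : Int), (hi - lo).toNat ≤ m →
    1 ≤ lo → lo < hi → tri lo ≤ n → n < tri hi →
    1 ≤ altBin n lo hi ∧ tri (altBin n lo hi) ≤ n ∧ n < tri (altBin n lo hi + 1) := by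
  intro m
  induction m with
  | zero => intro n lo hi hm h1 h2 _ _; omega
  | succ m ih =>
    intro n lo hi hm h1 h2 h3 h4
    rw [altBin]
    by_cases hgap : 1 < hi - lo
    · have hmid : lo + 1 ≤ PySem.Int.floordiv (lo + hi) 2 ∧
          PySem.Int.floordiv (lo + hi) 2 + 1 ≤ hi := by
        rw [PySem.Int.floordiv_eq_ediv_of_pos (by norm_num)]
        omega
      rw [dif_pos hgap]
      by_cases hc : PySem.Int.floordiv
          (PySem.Int.floordiv (lo + hi) 2 * (PySem.Int.floordiv (lo + hi) 2 + 1)) 2 ≤ n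
      · rw [if_pos hc]
        rw [tri_floordiv] at hc
        exact ih n _ hi (by omega) (by omega) (by omega) hc h4
      · rw [if_neg hc]
        rw [tri_floordiv] at hc
        exact ih n lo _ (by omega) h1 (by omega) h3 (by omega)
    · rw [dif_neg hgap]
      have hhi : hi = lo + 1 := by omega
      exact ⟨h1, h3, by rw [← hhi]; exact h4⟩

-- ===== VERDICT (by name: the statement is the Claim_ definition above) =====
theorem maxPrizes_spec : Claim_equal_maxPrizes := by
  intro n _
  unfold Spec_maxPrizes maxPrizes maxPrizes_alt
  by_cases hn : n ≤ 0
  · rw [if_pos hn, maxPrizesLoop, dif_neg (by omega)]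
  · rw [if_neg hn]
    have hn1 : 1 ≤ n := by omega
    have hgrow := altGrow_spec (2 * n + 1 - 2).toNat n 2 (by norm_num) (le_refl _)
    set hi := altGrow n 2 (by norm_num) with hhi
    have htri1 : tri 1 = 1 := by decide
    have hbin := altBin_spec (hi - 1).toNat n 1 hi (le_refl _) (le_refl _)
      (by omega) (by omega) hgrow.2
    set k := altBin n 1 hi with hk
    have h0 : tri (1 - 1) = 0 := by decide
    have hmain := loopA_spec k hbin.1 n.toNat n 1 (by norm_num) [] (le_refl _) hn1
      (by have := hbin.2.1; omega) (by have := hbin.2.2; omega)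
    simp only [List.nil_append] at hmain
    show maxPrizesLoop n 1 (by norm_num) [] =
      PySem.List.pyRange 1 k 1 ++ [n - PySem.Int.floordiv ((k - 1) * k) 2]
    rw [hmain]
    have he : (k - 1) * k = (k - 1) * ((k - 1) + 1) := by ring
    rw [he, tri_floordiv, h0]
    norm_num
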